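-- pv_equiv track=rewrite | github.com/anna-02/549proj | get_goog_searches_eng.py | build_date_ranges
-- ===== SOURCE A (Python) =====
-- def build_date_ranges(num_years,start_year = 2022):
--     time_frames = []
--     for i in range(num_years*12):
--         month = i%12+1
--         year = start_year + (i // 12)
--         nex_month = (i+1)%12+1
--         next_year = start_year + ((i+1)// 12)
--         time_frames.append(f'{year}-{month:02d}-01 {next_year:04d}-{nex_month:02d}-01')
--     return time_frames
-- ===== SOURCE B (Python) =====
-- def build_date_ranges(num_years, start_year=2022):
--     # Running calendar cursor instead of deriving each month/year from the loop index.
--     out = []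
--     cur_month, cur_year = 1, start_year
--     nex_month, nex_year = 2, start_year
--     for _ in range(num_years * 12):
--         out.append(f'{cur_year}-{cur_month:02d}-01 {nex_year:04d}-{nex_month:02d}-01')
--         cur_month, cur_year = nex_month, nex_year
--         nex_month += 1
--         if nex_month == 13:
--             nex_month = 1
--             nex_year += 1
--     return out
-- ===== Notes on version B (the rewrite author's own statement) =====
-- stated objective: alternative
-- what changed: B replaces A's per-index arithmetic (i%12, i//12 recomputed for i and i+1 every iteration) with a running calendar cursor (current and next month/year threaded through the loop and advanced with a 12->1 rollover).
import Mathlib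
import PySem

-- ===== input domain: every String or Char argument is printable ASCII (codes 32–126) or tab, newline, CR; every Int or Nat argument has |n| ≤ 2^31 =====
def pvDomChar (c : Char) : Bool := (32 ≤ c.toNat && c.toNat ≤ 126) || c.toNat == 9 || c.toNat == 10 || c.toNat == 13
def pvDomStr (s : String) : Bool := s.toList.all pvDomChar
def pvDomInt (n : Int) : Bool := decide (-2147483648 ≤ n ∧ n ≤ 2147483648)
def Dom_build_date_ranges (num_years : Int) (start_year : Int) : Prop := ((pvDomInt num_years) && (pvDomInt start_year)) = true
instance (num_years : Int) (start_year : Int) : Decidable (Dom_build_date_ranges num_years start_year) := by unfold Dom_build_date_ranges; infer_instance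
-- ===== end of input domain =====

-- ===== PORT A =====
-- B re-implements the same list with a running calendar cursor (simpler state threading); return value proved equal.

-- shared date-string formatter: Python's f'{year}-{month:02d}-01 {next_year:04d}-{nex_month:02d}-01'
-- %0wd: zero pad to width w, sign counted in the width (exact port of Python's format spec for ints)
def pvZfill (w : Nat) (s : List Char) : List Char := List.replicate (w - s.length) '0' ++ s

def pvPad (w : Nat) (n : Int) : List Char :=
  if n < 0 then '-' :: pvZfill (w - 1) (PySem.Int.toChars (-n)) else pvZfill w (PySem.Int.toChars n)

def pvFmt (year : Int) (month : Int) (next_year : Int) (nex_month : Int) : String :=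
  String.ofList (PySem.Int.toChars year ++ ['-'] ++ pvPad 2 month ++ "-01 ".toList ++
             pvPad 4 next_year ++ ['-'] ++ pvPad 2 nex_month ++ "-01".toList)

def build_date_ranges (num_years : Int) (start_year : Int) : List String :=
  -- the append-to-time_frames loop, encoded with the standard reversed accumulator (cons, final reverse)
  ((PySem.List.pyRange 0 (num_years * 12) 1).foldl
    (fun time_frames i =>
      pvFmt (start_year + PySem.Int.floordiv i 12) (PySem.Int.mod i 12 + 1)
            (start_year + PySem.Int.floordiv (i + 1) 12) (PySem.Int.mod (i + 1) 12 + 1) :: time_frames)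
    []).reverse

-- ===== PORT B =====
-- Source B's loop: fuel, calendar state, and the output list accumulated in reverse (final reverse below)
def pvAltLoop : Nat → Int → Int → Int → Int → List String → List String
  | 0, _, _, _, _, out => out
  | n + 1, cm, cy, nm, ny, out =>
    pvAltLoop n nm ny (if nm + 1 = 13 then 1 else nm + 1) (if nm + 1 = 13 then ny + 1 else ny)
      (pvFmt cy cm ny nm :: out)

def build_date_ranges_alt (num_years : Int) (start_year : Int) : List String :=
  (pvAltLoop (num_years * 12).toNat 1 start_year 2 start_year []).reverse

-- ===== PRECONDITION & SPEC =====

def Spec_build_date_ranges (num_years : Int) (start_year : Int) (out : List String) : Prop := out = build_date_ranges_alt num_years start_year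
instance (num_years : Int) (start_year : Int) (out : List String) : Decidable (Spec_build_date_ranges num_years start_year out) := by unfold Spec_build_date_ranges; infer_instance

-- ===== CLAIM (what is proved, stated in full; the proofs are below) =====
def Claim_equal_build_date_ranges : Prop := ∀ (num_years : Int) (start_year : Int), Dom_build_date_ranges num_years start_year → Spec_build_date_ranges num_years start_year (build_date_ranges num_years start_year)

-- ===== LEMMAS AND PROOFS =====

theorem pv_foldl_cons (f : Int → String) : ∀ (l : List Int) (init : List String),
    l.foldl (fun acc i => f i :: acc) init = (l.map f).reverse ++ init
  | [], init => by simp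
  | x :: xs, init => by
    simp only [List.foldl, List.map, List.reverse_cons]
    rw [pv_foldl_cons f xs]
    simp

-- the common closed form of the j-th produced string (j a Nat index)
def pvG (sy : Int) (j : Nat) : String :=
  pvFmt (sy + ((j / 12 : Nat) : Int)) (((j % 12 : Nat) : Int) + 1)
        (sy + (((j + 1) / 12 : Nat) : Int)) ((((j + 1) % 12 : Nat) : Int) + 1)

theorem pvG_eq (sy : Int) (j : Nat) :
    pvFmt (sy + PySem.Int.floordiv (↑j) 12) (PySem.Int.mod (↑j) 12 + 1)
          (sy + PySem.Int.floordiv (↑j + 1) 12) (PySem.Int.mod (↑j + 1) 12 + 1) = pvG sy j := by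
  have h1 : PySem.Int.floordiv (↑j) 12 = ((j / 12 : Nat) : Int) := by
    exact_mod_cast PySem.Int.floordiv_natCast j 12
  have h2 : PySem.Int.mod (↑j) 12 = ((j % 12 : Nat) : Int) := by
    exact_mod_cast PySem.Int.mod_natCast j 12
  have hc : (↑j + 1 : Int) = ((j + 1 : Nat) : Int) := by push_cast; ring
  have h3 : PySem.Int.floordiv (↑j + 1) 12 = (((j + 1) / 12 : Nat) : Int) := by
    rw [hc]; exact_mod_cast PySem.Int.floordiv_natCast (j + 1) 12
  have h4 : PySem.Int.mod (↑j + 1) 12 = (((j + 1) % 12 : Nat) : Int) := by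
    rw [hc]; exact_mod_cast PySem.Int.mod_natCast (j + 1) 12
  rw [h1, h2, h3, h4, pvG]

theorem pvA_eq_map (ny sy : Int) :
    build_date_ranges ny sy = (List.range (ny * 12).toNat).map (pvG sy) := by
  unfold build_date_ranges
  rw [PySem.List.pyRange_one, pv_foldl_cons, List.map_map]
  simp only [List.append_nil, List.reverse_reverse, Int.sub_zero]
  refine List.map_congr_left (fun k _ => ?_)
  simp only [Function.comp, Int.zero_add]
  exact pvG_eq sy k

theorem pv_loop_inv (sy : Int) : ∀ (k i : Nat) (out : List String),
    pvAltLoop k (((i % 12 : Nat) : Int) + 1) (sy + ((i / 12 : Nat) : Int))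
               ((((i + 1) % 12 : Nat) : Int) + 1) (sy + (((i + 1) / 12 : Nat) : Int)) out
      = ((List.range' i k).map (pvG sy)).reverse ++ out
  | 0, i, out => by simp [pvAltLoop]
  | k + 1, i, out => by
    rw [List.range', List.map_cons, List.reverse_cons, List.append_assoc, List.singleton_append]
    simp only [pvAltLoop]
    have hm : ((((i + 1) % 12 : Nat) : Int) + 1) + 1 = 13 ↔ (i + 1) % 12 = 11 := by
      constructor <;> intro h <;> omega
    have hout : pvFmt (sy + ((i / 12 : Nat) : Int)) (((i % 12 : Nat) : Int) + 1)
        (sy + (((i + 1) / 12 : Nat) : Int)) ((((i + 1) % 12 : Nat) : Int) + 1) = pvG sy i := rfl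
    have hrec := pv_loop_inv sy k (i + 1) (pvG sy i :: out)
    by_cases h : (i + 1) % 12 = 11
    · have h2 : (i + 1 + 1) % 12 = 0 := by omega
      have h3 : (i + 1 + 1) / 12 = (i + 1) / 12 + 1 := by omega
      rw [if_pos (hm.mpr h), if_pos (hm.mpr h), hout]
      rw [h2, h3] at hrec
      push_cast at hrec
      ring_nf at hrec ⊢
      exact hrec
    · have h2 : (i + 1 + 1) % 12 = (i + 1) % 12 + 1 := by omega
      have h3 : (i + 1 + 1) / 12 = (i + 1) / 12 := by omega
      rw [if_neg (fun hh => h (hm.mp hh)), if_neg (fun hh => h (hm.mp hh)), hout]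
      rw [h2, h3] at hrec
      push_cast at hrec
      ring_nf at hrec ⊢
      exact hrec

theorem pvB_eq_map (ny sy : Int) :
    build_date_ranges_alt ny sy = (List.range (ny * 12).toNat).map (pvG sy) := by
  unfold build_date_ranges_alt
  have h := pv_loop_inv sy (ny * 12).toNat 0 []
  norm_num at h
  rw [h, List.range_eq_range']
  simp

-- ===== VERDICT (by name: the statement is the Claim_ definition above) =====
theorem build_date_ranges_spec : Claim_equal_build_date_ranges := by
  intro ny sy _
  unfold Spec_build_date_ranges
  rw [pvA_eq_map, pvB_eq_map]
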